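-- pv_equiv track=rewrite | github.com/franzadrian/Vigilink-project | resident_panel/views.py | determine_priority_from_reasons
-- ===== SOURCE A (Python) =====
-- def determine_priority_from_reasons(reasons_list):
--     """
--     Automatically determine report priority based on selected reasons.
--     Returns the highest priority level if multiple reasons are selected.
--
--     Priority levels:
--     - Level 1: Minor disturbances, observations
--     - Level 2: Suspicious but non-threatening behavior
--     - Level 3: Property damage, harassment, violations, criminal activity, serious threats
--     """
--     if not reasons_list:
--         return 'level_2'  # Default if no reasons
--
--     # Normalize reasons to lowercase for comparison
--     reasons_lower = [reason.lower().strip() for reason in reasons_list]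
--
--     # Level 3 - Serious: Property damage, harassment, violations, criminal activity
--     level3_keywords = [
--         'possible criminal activity',
--         'criminal activity',
--         'vandalism',
--         'property damage',
--         'harassment',
--         'threats',
--         'reckless driving',
--         'speeding',
--         'trespassing',
--         'impersonation',
--         'identity misuse',
--         'false information'
--     ]
--
--     # Level 2 - Suspicious or concerning behavior
--     level2_keywords = [
--         'suspicious behavior',
--         'animal-related concern',
--         'other'
--     ]
--
--     # Level 1 - Minor disturbances
--     level1_keywords = [
--         'noise disturbance',
--         'observations',
--         'improper garbage disposal',
--         'dumping'
--     ]
--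
--     # Check for level 3 reasons first (most serious)
--     for reason in reasons_lower:
--         for keyword in level3_keywords:
--             if keyword in reason:
--                 return 'level_3'
--
--     # Check for level 2 reasons (suspicious)
--     for reason in reasons_lower:
--         for keyword in level2_keywords:
--             if keyword in reason:
--                 return 'level_2'
--
--     # Check for level 1 reasons (minor)
--     for reason in reasons_lower:
--         for keyword in level1_keywords:
--             if keyword in reason:
--                 return 'level_1'
--
--     # Default to level 2 if no matches
--     return 'level_2'
-- ===== SOURCE B (Python) =====
-- _LEVEL_TABLE = [
--     (3, [
--         'possible criminal activity', 'criminal activity', 'vandalism',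
--         'property damage', 'harassment', 'threats', 'reckless driving',
--         'speeding', 'trespassing', 'impersonation', 'identity misuse',
--         'false information',
--     ]),
--     (2, ['suspicious behavior', 'animal-related concern', 'other']),
--     (1, ['noise disturbance', 'observations', 'improper garbage disposal', 'dumping']),
-- ]
--
-- _LABELS = {3: 'level_3', 2: 'level_2', 1: 'level_1'}
--
--
-- def determine_priority_from_reasons(reasons_list):
--     best = 0
--     for reason in reasons_list:
--         r = reason.lower().strip()
--         for level, keywords in _LEVEL_TABLE:
--             if any(k in r for k in keywords):
--                 best = max(best, level)
--                 break
--     return _LABELS.get(best, 'level_2')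
-- ===== Notes on version B (the rewrite author's own statement) =====
-- stated objective: simpler
-- what changed: Replaces three separate early-return scans over the reason list with a keyword table keyed by level, one pass keeping the maximum matched level, and a final table lookup mapping that maximum (0 = no match) to its label.
import Mathlib
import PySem

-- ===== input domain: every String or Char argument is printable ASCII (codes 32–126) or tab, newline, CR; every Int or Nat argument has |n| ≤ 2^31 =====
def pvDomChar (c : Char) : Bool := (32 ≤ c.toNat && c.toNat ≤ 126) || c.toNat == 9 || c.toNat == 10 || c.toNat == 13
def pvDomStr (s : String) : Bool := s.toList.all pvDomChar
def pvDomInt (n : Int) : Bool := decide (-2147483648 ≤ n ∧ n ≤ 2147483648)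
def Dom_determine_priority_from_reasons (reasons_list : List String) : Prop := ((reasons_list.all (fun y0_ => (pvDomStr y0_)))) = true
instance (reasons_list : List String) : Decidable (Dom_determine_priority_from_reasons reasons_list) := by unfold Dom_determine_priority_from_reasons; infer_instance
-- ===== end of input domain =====

-- B replaces A's three early-return scans by a level-keyed keyword table, one pass
-- keeping the maximum matched level, and a final lookup (objective: simpler).

-- ===== PORT A =====
def level3_keywords : List String :=
  ["possible criminal activity", "criminal activity", "vandalism", "property damage",
   "harassment", "threats", "reckless driving", "speeding", "trespassing",
   "impersonation", "identity misuse", "false information"]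

def level2_keywords : List String :=
  ["suspicious behavior", "animal-related concern", "other"]

def level1_keywords : List String :=
  ["noise disturbance", "observations", "improper garbage disposal", "dumping"]

-- inner loop: 'for keyword in kws: if keyword in reason: return …'
def pvMatchAny (kws : List String) (reason : String) : Bool :=
  match kws with
  | [] => false
  | k :: rest => if PySem.Str.isIn k reason then true else pvMatchAny rest reason

-- outer loop: 'for reason in reasons: …'
def pvScan (kws : List String) (reasons : List String) : Bool :=
  match reasons with
  | [] => false
  | r :: rest => if pvMatchAny kws r then true else pvScan kws rest

def determine_priority_from_reasons (reasons_list : List String) : String :=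
  if reasons_list = [] then "level_2"
  else
    let reasons_lower := reasons_list.map (fun r => PySem.Str.strip (PySem.Str.lower r))
    if pvScan level3_keywords reasons_lower then "level_3"
    else if pvScan level2_keywords reasons_lower then "level_2"
    else if pvScan level1_keywords reasons_lower then "level_1"
    else "level_2"

-- ===== PORT B =====
def pvLevelTable : List (Nat × List String) :=
  [(3, ["possible criminal activity", "criminal activity", "vandalism", "property damage",
        "harassment", "threats", "reckless driving", "speeding", "trespassing",
        "impersonation", "identity misuse", "false information"]),
   (2, ["suspicious behavior", "animal-related concern", "other"]),
   (1, ["noise disturbance", "observations", "improper garbage disposal", "dumping"])]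

-- 'for level, keywords in _LEVEL_TABLE: if any(k in r for k in keywords): …; break'
def pvTableLevel (table : List (Nat × List String)) (r : String) (best : Nat) : Nat :=
  match table with
  | [] => best
  | (level, kws) :: rest =>
      if kws.any (fun k => PySem.Str.isIn k r) then max best level
      else pvTableLevel rest r best

def pvLabels : PySem.Dict Nat String := PySem.Dict.ofList [(3, "level_3"), (2, "level_2"), (1, "level_1")]

def determine_priority_from_reasons_alt (reasons_list : List String) : String :=
  let best := reasons_list.foldl
    (fun best reason => pvTableLevel pvLevelTable (PySem.Str.strip (PySem.Str.lower reason)) best) 0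
  PySem.Dict.getD pvLabels best "level_2"

-- ===== PRECONDITION & SPEC =====
def Spec_determine_priority_from_reasons (reasons_list : List String) (out : String) : Prop := out = determine_priority_from_reasons_alt reasons_list
instance (reasons_list : List String) (out : String) : Decidable (Spec_determine_priority_from_reasons reasons_list out) := by unfold Spec_determine_priority_from_reasons; infer_instance

-- ===== CLAIM (what is proved, stated in full; the proofs are below) =====
def Claim_equal_determine_priority_from_reasons : Prop := ∀ (reasons_list : List String), Dom_determine_priority_from_reasons reasons_list → Spec_determine_priority_from_reasons reasons_list (determine_priority_from_reasons reasons_list)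

-- ===== LEMMAS AND PROOFS =====

-- A reason's level as B computes it, written with A's match predicate.
def pvCrit (r : String) : Nat :=
  if pvMatchAny level3_keywords r then 3
  else if pvMatchAny level2_keywords r then 2
  else if pvMatchAny level1_keywords r then 1
  else 0

theorem pvMatchAny_eq_any (kws : List String) (r : String) :
    pvMatchAny kws r = kws.any (fun k => PySem.Str.isIn k r) := by
  induction kws with
  | nil => rfl
  | cons k rest ih =>
      rw [pvMatchAny]
      cases h : PySem.Str.isIn k r <;> simp at h <;> simp [h, ih]

theorem pvTableLevel_eq (r : String) (best : Nat) :
    pvTableLevel pvLevelTable r best = max best (pvCrit r) := by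
  simp only [pvLevelTable, pvTableLevel, pvCrit, pvMatchAny_eq_any,
    level3_keywords, level2_keywords, level1_keywords]
  split_ifs <;> omega

def pvBest (reasons : List String) : Nat :=
  if pvScan level3_keywords reasons then 3
  else if pvScan level2_keywords reasons then 2
  else if pvScan level1_keywords reasons then 1
  else 0

theorem pvBest_cons (r : String) (rs : List String) :
    pvBest (r :: rs) = max (pvCrit r) (pvBest rs) := by
  simp only [pvBest, pvCrit, pvScan]
  by_cases h3 : pvMatchAny level3_keywords r = true <;>
    by_cases h2 : pvMatchAny level2_keywords r = true <;>
      by_cases h1 : pvMatchAny level1_keywords r = true <;>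
        simp [h3, h2, h1] <;> split_ifs <;> omega

theorem pvFold_eq (rs : List String) (b : Nat) :
    rs.foldl (fun best reason => pvTableLevel pvLevelTable (PySem.Str.strip (PySem.Str.lower reason)) best) b
      = max b (pvBest (rs.map (fun r => PySem.Str.strip (PySem.Str.lower r)))) := by
  induction rs generalizing b with
  | nil => simp [pvBest, pvScan]
  | cons r rest ih =>
      simp only [List.foldl, List.map]
      rw [ih, pvTableLevel_eq, pvBest_cons]
      omega

theorem pvBest_le (rs : List String) : pvBest rs ≤ 3 := by
  unfold pvBest; split_ifs <;> omega

-- ===== VERDICT (by name: the statement is the Claim_ definition above) =====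
theorem determine_priority_from_reasons_spec : Claim_equal_determine_priority_from_reasons := by
  intro rs _
  show determine_priority_from_reasons rs = determine_priority_from_reasons_alt rs
  unfold determine_priority_from_reasons determine_priority_from_reasons_alt
  rw [pvFold_eq]
  cases rs with
  | nil => simp [pvBest, pvScan]; decide
  | cons r rest =>
      simp only [if_neg (List.cons_ne_nil r rest), Nat.zero_max]
      have h := pvBest_le ((r :: rest).map (fun r => PySem.Str.strip (PySem.Str.lower r)))
      unfold pvBest at *
      split_ifs at * <;> decide
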